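-- pv_equiv track=rewrite | github.com/vizamo/Python-Study-Coding | ICA0002/conversation.py | find_fibonacci_numbers
-- ===== SOURCE A (Python) =====
-- def find_fibonacci_numbers(biggest_number: int):
--     """
--     Find all Fibonacci numbers in range(end inclusive).
--
--     Can be solved using recursion.
--     :param biggest_number: all fibonacci numbers in range of biggest_number(included)
--     https://en.wikipedia.org/wiki/Fibonacci_number
--     :return: list of fibonacci numbers
--     """
--     a = [0, 1, 1]
--     if biggest_number == 0:
--         return [0]
--     if biggest_number == 1:
--         return a
--     if biggest_number == 2:
--         return a + [2]
--     n = 3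
--     fibo = 1
--     while fibo <= biggest_number:
--         fibo = help_find_fibonacci(n)
--         n += 1
--         a.append(fibo)
--     return a[:-1]
--
-- def help_find_fibonacci(now: int):
--     """"A."""
--     if now <= 0:
--         return 0
--     if now == 1:
--         return 1
--     else:
--         fibo = help_find_fibonacci(now - 1) + help_find_fibonacci(now - 2)
--         return fibo
-- ===== SOURCE B (Python) =====
-- def find_fibonacci_numbers(biggest_number: int):
--     """Iterative running-pair Fibonacci: O(k) instead of A's exponential recursion."""
--     fibs = []
--     a, b = 0, 1
--     while a <= biggest_number:
--         fibs.append(a)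
--         a, b = b, a + b
--     return fibs
-- ===== Notes on version B (the rewrite author's own statement) =====
-- stated objective: faster
-- what changed: Replaced the naive exponential recursive helper called once per list element by a single loop carrying the running pair (a, b) of consecutive Fibonacci numbers; Pre_ restricts to the natural domain of non-negative bounds, on negative bounds A returns [0, 1] while B returns [].
-- outside the precondition, e.g. on find_fibonacci_numbers(-1): A returns [0, 1], B returns []; on find_fibonacci_numbers(-5): A returns [0, 1], B returns []
import Mathlib
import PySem

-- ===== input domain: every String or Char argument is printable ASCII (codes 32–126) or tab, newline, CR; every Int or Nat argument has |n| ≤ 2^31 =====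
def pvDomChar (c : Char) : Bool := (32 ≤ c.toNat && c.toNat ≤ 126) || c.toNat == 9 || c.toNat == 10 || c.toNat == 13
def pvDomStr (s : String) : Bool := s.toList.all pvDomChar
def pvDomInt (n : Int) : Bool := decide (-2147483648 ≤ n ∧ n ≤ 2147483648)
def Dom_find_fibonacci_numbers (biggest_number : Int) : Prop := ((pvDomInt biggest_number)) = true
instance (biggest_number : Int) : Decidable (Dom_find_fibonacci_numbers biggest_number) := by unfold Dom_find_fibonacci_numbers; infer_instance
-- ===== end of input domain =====

-- B replaces A's exponential recursive helper by one loop over a running pair (faster, asymptotic).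

-- ===== PORT A =====

-- literal port of help_find_fibonacci
-- termination measures for the ports, named so the port bodies stay small proof-free terms
theorem pv_dec_help1 (now : Int) (h0 : ¬ now ≤ 0) : (now - 1).toNat < now.toNat := by omega
theorem pv_dec_help2 (now : Int) (h0 : ¬ now ≤ 0) : (now - 2).toNat < now.toNat := by omega

def help_find_fibonacci (now : Int) : Int :=
  if now ≤ 0 then 0
  else if now = 1 then 1
  else help_find_fibonacci (now - 1) + help_find_fibonacci (now - 2)
termination_by now.toNat
decreasing_by
  · exact pv_dec_help1 now ‹_›
  · exact pv_dec_help2 now ‹_›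

-- needed only for the termination proof of loopA_find: help_find_fibonacci n ≥ 1 for n ≥ 1
theorem help_find_fibonacci_pos (n : Int) (h : 1 ≤ n) : 1 ≤ help_find_fibonacci n := by
  by_cases h1 : n = 1
  · subst h1; rw [help_find_fibonacci]; norm_num
  · rw [help_find_fibonacci]
    rw [if_neg (by omega), if_neg h1]
    have ih1 : 1 ≤ help_find_fibonacci (n - 1) := help_find_fibonacci_pos (n - 1) (by omega)
    have ih2 : 0 ≤ help_find_fibonacci (n - 2) := by
      by_cases h2 : 1 ≤ n - 2
      · exact le_trans (by norm_num) (help_find_fibonacci_pos (n - 2) h2)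
      · rw [help_find_fibonacci, if_pos (by omega)]
    omega
termination_by n.toNat
decreasing_by all_goals omega

-- needed only for the termination proof of loopA_find: help_find_fibonacci n ≥ n - 1
theorem help_find_fibonacci_ge (n : Int) : n - 1 ≤ help_find_fibonacci n := by
  by_cases h0 : n ≤ 0
  · rw [help_find_fibonacci, if_pos h0]; omega
  · by_cases h1 : n = 1
    · subst h1; rw [help_find_fibonacci]; norm_num
    · rw [help_find_fibonacci, if_neg h0, if_neg h1]
      have ih := help_find_fibonacci_ge (n - 1)
      by_cases h2 : n = 2
      · have : help_find_fibonacci 0 = 0 := by rw [help_find_fibonacci]; norm_num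
        have h1' : (1 : Int) ≤ help_find_fibonacci 1 := help_find_fibonacci_pos 1 (by norm_num)
        subst h2; norm_num at *; omega
      · have hp : 1 ≤ help_find_fibonacci (n - 2) := help_find_fibonacci_pos (n - 2) (by omega)
        omega
termination_by n.toNat
decreasing_by all_goals omega

theorem pv_hf_step (n : Int) : (n + 1) - 2 ≤ help_find_fibonacci n := by
  have := help_find_fibonacci_ge n; omega
theorem pv_dec_loopA (bn n fibo : Int) (hf : n - 2 ≤ fibo) (h : fibo ≤ bn) :
    (bn + 3 - (n + 1)).toNat < (bn + 3 - n).toNat := by omega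

-- A's while loop; the hypothesis hf (an invariant A maintains) serves only termination
def loopA_find (bn n fibo : Int) (a : List Int) (hf : n - 2 ≤ fibo) : List Int :=
  if h : fibo ≤ bn then
    loopA_find bn (n + 1) (help_find_fibonacci n) (a ++ [help_find_fibonacci n]) (pv_hf_step n)
  else a
termination_by (bn + 3 - n).toNat
decreasing_by exact pv_dec_loopA bn n fibo hf h

theorem pv_start_hf : (3 : Int) - 2 ≤ 1 := by norm_num

def find_fibonacci_numbers (biggest_number : Int) : List Int :=
  let a : List Int := [0, 1, 1]
  if biggest_number = 0 then [0]
  else if biggest_number = 1 then a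
  else if biggest_number = 2 then a ++ [2]
  -- a[:-1] on a Python list is exactly List.dropLast (empty list gives empty list)
  else (loopA_find biggest_number 3 1 a pv_start_hf).dropLast

-- ===== PORT B =====

theorem pv_ha_step (a b : Int) (hb : 1 ≤ b) : (0 : Int) ≤ b := by omega
theorem pv_hb_step (a b : Int) (ha : 0 ≤ a) (hb : 1 ≤ b) : (1 : Int) ≤ a + b := by omega
theorem pv_dec_loopB (bn a b : Int) (ha : 0 ≤ a) (hb : 1 ≤ b) (h : a ≤ bn) :
    (bn + 1 - b).toNat + (bn + 1 - (a + b)).toNat < (bn + 1 - a).toNat + (bn + 1 - b).toNat := by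
  omega

-- B's while loop; the hypotheses (invariants of B's loop) serve only termination
def loopB_find (bn a b : Int) (fibs : List Int) (ha : 0 ≤ a) (hb : 1 ≤ b) : List Int :=
  if h : a ≤ bn then
    loopB_find bn b (a + b) (fibs ++ [a]) (pv_ha_step a b hb) (pv_hb_step a b ha hb)
  else fibs
termination_by ((bn + 1 - a).toNat + (bn + 1 - b).toNat)
decreasing_by exact pv_dec_loopB bn a b ha hb h

def find_fibonacci_numbers_alt (biggest_number : Int) : List Int :=
  loopB_find biggest_number 0 1 [] (le_refl 0) (le_refl 1)

-- ===== PRECONDITION & SPEC =====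
-- Pre_ restricts to the function's natural domain of non-negative bounds: on a negative bound,
-- outside that domain, A still returns [0, 1] while B returns [] (see the cited examples).
def Pre_find_fibonacci_numbers (biggest_number : Int) : Prop := 0 ≤ biggest_number
instance (biggest_number : Int) : Decidable (Pre_find_fibonacci_numbers biggest_number) := by unfold Pre_find_fibonacci_numbers; infer_instance

def pvWitness_find_fibonacci_numbers : Int := (7)

def Spec_find_fibonacci_numbers (biggest_number : Int) (out : List Int) : Prop := out = find_fibonacci_numbers_alt biggest_number
instance (biggest_number : Int) (out : List Int) : Decidable (Spec_find_fibonacci_numbers biggest_number out) := by unfold Spec_find_fibonacci_numbers; infer_instance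

-- ===== CLAIM (what is proved, stated in full; the proofs are below) =====
def Claim_equal_find_fibonacci_numbers : Prop := ∀ (biggest_number : Int), Dom_find_fibonacci_numbers biggest_number → Pre_find_fibonacci_numbers biggest_number → Spec_find_fibonacci_numbers biggest_number (find_fibonacci_numbers biggest_number)

-- ===== LEMMAS AND PROOFS =====

-- mathematical Fibonacci on Int
def Fz (n : Int) : Int := if n ≤ 0 then 0 else (Nat.fib n.toNat : Int)

theorem help_eq_Fz (n : Int) : help_find_fibonacci n = Fz n := by
  by_cases h0 : n ≤ 0
  · rw [help_find_fibonacci, if_pos h0, Fz, if_pos h0]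
  · by_cases h1 : n = 1
    · subst h1; rw [help_find_fibonacci]
      norm_num [Fz]
    · rw [help_find_fibonacci, if_neg h0, if_neg h1,
        help_eq_Fz (n - 1), help_eq_Fz (n - 2)]
      unfold Fz
      rw [if_neg h0, if_neg (by omega : ¬ n - 1 ≤ 0)]
      by_cases h2 : n = 2
      · subst h2
        have e0 : help_find_fibonacci 0 = 0 := by rw [help_find_fibonacci]; norm_num
        have e1 : help_find_fibonacci 1 = 1 := by rw [help_find_fibonacci]; norm_num
        norm_num [e0, e1, help_eq_Fz 0, help_eq_Fz 1] at *
        decide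
      · rw [if_neg (by omega : ¬ n - 2 ≤ 0)]
        have hm : n.toNat = (n - 2).toNat + 2 := by omega
        have h1' : (n - 1).toNat = (n - 2).toNat + 1 := by omega
        rw [hm, h1', Nat.fib_add_two]
        push_cast; ring
termination_by n.toNat
decreasing_by all_goals omega

theorem Fz_ge (n : Int) : n - 1 ≤ Fz n := help_eq_Fz n ▸ help_find_fibonacci_ge n

theorem Fz_pos (n : Int) (h : 1 ≤ n) : 1 ≤ Fz n := help_eq_Fz n ▸ help_find_fibonacci_pos n h

theorem Fz_nonneg (n : Int) : 0 ≤ Fz n := by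
  unfold Fz; split_ifs <;> positivity

theorem Fz_rec (n : Int) (h : 2 ≤ n) : Fz (n + 1) = Fz (n - 1) + Fz n := by
  unfold Fz
  rw [if_neg (by omega : ¬ n + 1 ≤ 0), if_neg (by omega : ¬ n - 1 ≤ 0),
    if_neg (by omega : ¬ n ≤ 0)]
  have h1 : (n + 1).toNat = (n - 1).toNat + 2 := by omega
  have h2 : n.toNat = (n - 1).toNat + 1 := by omega
  rw [h1, h2, Nat.fib_add_two]
  push_cast; ring

theorem hfA (n : Int) : (n + 1) - 2 ≤ Fz n := by have := Fz_ge n; omega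

-- the two loops compute the same list once A's overshoot element is dropped
theorem loopA_eq_loopB (bn : Int) : ∀ (k : Nat) (n : Int) (acc : List Int)
    (h2 : 2 ≤ n) (hk : (bn + 3 - n).toNat ≤ k),
    (loopA_find bn n (Fz (n - 1)) (acc ++ [Fz (n - 1)]) (by have := hfA (n - 1); omega)).dropLast
      = loopB_find bn (Fz (n - 1)) (Fz n) acc (Fz_nonneg _) (Fz_pos n (by omega)) := by
  intro k
  induction k with
  | zero =>
    intro n acc h2 hk
    have hg : ¬ Fz (n - 1) ≤ bn := by have := Fz_ge (n - 1); omega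
    rw [loopA_find, dif_neg hg, loopB_find, dif_neg hg, List.dropLast_concat]
  | succ k ih =>
    intro n acc h2 hk
    by_cases hg : Fz (n - 1) ≤ bn
    · rw [loopA_find, dif_pos hg, loopB_find, dif_pos hg]
      have hmeas : (bn + 3 - (n + 1)).toNat ≤ k := by
        have := Fz_ge (n - 1); omega
      have key := ih (n + 1) (acc ++ [Fz (n - 1)]) (by omega) hmeas
      simp only [add_sub_cancel_right] at key
      simp only [help_eq_Fz n, ← Fz_rec n h2]
      exact key
    · rw [loopA_find, dif_neg hg, loopB_find, dif_neg hg, List.dropLast_concat]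

-- ===== VERDICT (by name: the statement is the Claim_ definition above) =====
theorem find_fibonacci_numbers_spec : Claim_equal_find_fibonacci_numbers := by
  intro bn _ hnd
  unfold Pre_find_fibonacci_numbers at hnd
  by_cases h0 : bn = 0
  · subst h0
    show find_fibonacci_numbers 0 = find_fibonacci_numbers_alt 0
    rw [find_fibonacci_numbers, find_fibonacci_numbers_alt]
    rw [loopB_find]; norm_num
    rw [loopB_find]; norm_num
  · by_cases h1 : bn = 1
    · subst h1
      show find_fibonacci_numbers 1 = find_fibonacci_numbers_alt 1
      rw [find_fibonacci_numbers, find_fibonacci_numbers_alt]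
      rw [loopB_find]; norm_num
      rw [loopB_find]; norm_num
      rw [loopB_find]; norm_num
      rw [loopB_find]; norm_num
    · by_cases h2 : bn = 2
      · subst h2
        show find_fibonacci_numbers 2 = find_fibonacci_numbers_alt 2
        rw [find_fibonacci_numbers, find_fibonacci_numbers_alt]
        rw [loopB_find]; norm_num
        rw [loopB_find]; norm_num
        rw [loopB_find]; norm_num
        rw [loopB_find]; norm_num
        rw [loopB_find]; norm_num
      · have hbn : 3 ≤ bn := by omega
        show find_fibonacci_numbers bn = find_fibonacci_numbers_alt bn
        rw [find_fibonacci_numbers]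
        simp only [if_neg h0, if_neg h1, if_neg h2]
        have key := loopA_eq_loopB bn (bn + 3 - 3).toNat 3 [0, 1] (by omega) (le_refl _)
        have hF2 : Fz (3 - 1) = 1 := by decide
        have hF3 : Fz 3 = 2 := by decide
        simp only [hF2] at key
        rw [show ([0, 1, 1] : List Int) = [0, 1] ++ [1] by norm_num, key]
        have halt : find_fibonacci_numbers_alt bn
            = loopB_find bn 1 2 [0, 1] (by norm_num) (by norm_num) := by
          rw [find_fibonacci_numbers_alt]
          rw [loopB_find, dif_pos (show (0 : Int) ≤ bn by omega)]
          rw [loopB_find, dif_pos (show (1 : Int) ≤ bn by omega)]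
          norm_num
        rw [halt]
        simp only [hF3]
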